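-- pv_equiv track=rewrite | github.com/MarcelloLins/LeetcodePractice | Medium/034_first_and_last_position_of_element_in_sorted_array.py | expand_search_range
-- ===== SOURCE A (Python) =====
-- def expand_search_range(nums, target, starting_idx):
--     left = right = starting_idx
--     searching_left = searching_right = True
--     while searching_left or searching_right:
--         # Lower array boundary and stop condition
--         if left - 1 < 0 or nums[left - 1] != target:
--             searching_left = False
--         else:
--             left = left - 1
--
--         # Upper array boundary and stop condition
--         if right + 1 > len(nums) - 1 or nums[right + 1] != target:
--             searching_right = False
--         else:
--             right = right + 1
--
--     return [left, right]
-- ===== SOURCE B (Python) =====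
-- def expand_search_range(nums, target, starting_idx):
--     n = len(nums)
--     # L[i] = length of the run of target ending at index i (one left-to-right pass)
--     L = []
--     run = 0
--     for x in nums:
--         run = run + 1 if x == target else 0
--         L.append(run)
--     # R[i] = length of the run of target starting at index i (one right-to-left pass)
--     R = []
--     run = 0
--     for x in reversed(nums):
--         run = run + 1 if x == target else 0
--         R.append(run)
--     R.reverse()
--     left = starting_idx - (L[starting_idx - 1] if starting_idx >= 1 else 0)
--     right = starting_idx + (R[starting_idx + 1] if 0 <= starting_idx + 1 < n else 0)
--     return [left, right]
-- ===== Notes on version B (the rewrite author's own statement) =====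
-- stated objective: alternative
-- what changed: A expands two pointers outward from starting_idx in a lock-step while loop with two searching flags; B precomputes in two full passes the run-length tables L (run of target ending at i) and R (run of target starting at i) over the whole list and answers with two O(1) table lookups.
-- intended difference: For starting_idx <= -2 (in bounds only through Python's negative-index wraparound) with nums[starting_idx+1] == target, A expands right through wrapped negative indices and possibly past nums[0], returning a right boundary above starting_idx, while B returns [starting_idx, starting_idx]; B's is the intended value since expanding across the array's end is an accident of A's indexing. — e.g. on expand_search_range([7], 7, -2): A returns [-2, 0], B returns [-2, -2]
import Mathlib
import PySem

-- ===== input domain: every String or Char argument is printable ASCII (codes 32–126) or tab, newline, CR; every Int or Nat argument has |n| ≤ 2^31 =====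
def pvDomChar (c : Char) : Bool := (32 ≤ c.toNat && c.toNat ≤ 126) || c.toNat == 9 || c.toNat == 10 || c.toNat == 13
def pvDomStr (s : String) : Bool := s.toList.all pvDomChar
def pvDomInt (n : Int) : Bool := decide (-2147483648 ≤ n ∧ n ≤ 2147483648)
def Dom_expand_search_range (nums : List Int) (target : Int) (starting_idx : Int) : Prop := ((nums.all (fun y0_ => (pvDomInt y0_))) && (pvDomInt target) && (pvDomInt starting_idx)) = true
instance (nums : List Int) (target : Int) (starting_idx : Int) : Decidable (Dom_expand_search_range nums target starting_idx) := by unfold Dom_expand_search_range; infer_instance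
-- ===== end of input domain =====

-- B replaces A's two-pointer expansion loop by two full precomputation passes building run-length
-- tables (run of target ending at i / starting at i) followed by two O(1) lookups; objective: alternative.

-- ===== PORT A =====
-- Literal port of A's while loop: state (left, right, searching_left, searching_right),
-- fuel only makes the recursion total (nums.length + 1 iterations always suffice under Pre_).
def pvLoopA (nums : List Int) (target : Int) : Nat → Int → Int → Bool → Bool → List Int
  | 0, left, right, _, _ => [left, right]
  | fuel+1, left, right, sl, sr =>
    if sl || sr then
      -- if left - 1 < 0 or nums[left - 1] != target: stop, else left -= 1
      let pL := if left - 1 < 0 ∨ PySem.List.pyGet? nums (left - 1) ≠ some target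
                then (left, false) else (left - 1, sl)
      -- if right + 1 > len(nums) - 1 or nums[right + 1] != target: stop, else right += 1
      let pR := if right + 1 > (nums.length : Int) - 1 ∨ PySem.List.pyGet? nums (right + 1) ≠ some target
                then (right, false) else (right + 1, sr)
      pvLoopA nums target fuel pL.1 pR.1 pL.2 pR.2
    else [left, right]

def expand_search_range (nums : List Int) (target : Int) (starting_idx : Int) : List Int :=
  pvLoopA nums target (nums.length + 1) starting_idx starting_idx true true

-- ===== PORT B =====
-- Source B's table-building loop: carries the current run length, emits one table entry per element.
def pvBuildL (target : Int) : List Int → Nat → List Nat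
  | [], _ => []
  | x :: xs, run =>
    let r := if x = target then run + 1 else 0
    r :: pvBuildL target xs r

def expand_search_range_alt (nums : List Int) (target : Int) (starting_idx : Int) : List Int :=
  let n : Int := nums.length
  let L := pvBuildL target nums 0
  let R := (pvBuildL target nums.reverse 0).reverse
  -- Python's L[starting_idx-1] / R[starting_idx+1]: the guards put both indices in range on every
  -- input admitted by Pre_ (where Python B returns); .getD 0 only pads where Python B raises.
  let left := starting_idx -
    (if 1 ≤ starting_idx then (((PySem.List.pyGet? L (starting_idx - 1)).getD 0 : Nat) : Int) else 0)
  let right := starting_idx +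
    (if 0 ≤ starting_idx + 1 ∧ starting_idx + 1 < n then (((PySem.List.pyGet? R (starting_idx + 1)).getD 0 : Nat) : Int) else 0)
  [left, right]

-- ===== PRECONDITION & SPEC =====
-- Pre_ excludes exactly the inputs on which A raises IndexError (a start position more than one
-- step past either end of the list, where A's very first subscript is out of range).
def Pre_expand_search_range (nums : List Int) (target : Int) (starting_idx : Int) : Prop :=
  -(nums.length : Int) - 1 ≤ starting_idx ∧ starting_idx ≤ (nums.length : Int)
instance (nums : List Int) (target : Int) (starting_idx : Int) : Decidable (Pre_expand_search_range nums target starting_idx) := by unfold Pre_expand_search_range; infer_instance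

def pvWitness_expand_search_range : List Int × Int × Int := ([5, 5, 5, 7], 5, 1)

-- For starting_idx ≤ -2 (in bounds only through Python's negative-index wraparound) with
-- nums[starting_idx+1] == target, A expands right through wrapped negative indices and possibly past
-- nums[0], returning a right boundary above starting_idx, while B returns
-- [starting_idx, starting_idx]; B's is the intended value since expanding across the array's end is
-- an accident of A's indexing.
def D_expand_search_range (nums : List Int) (target : Int) (starting_idx : Int) : Prop :=
  starting_idx ≤ -2 ∧ PySem.List.pyGet? nums (starting_idx + 1) = some target
instance (nums : List Int) (target : Int) (starting_idx : Int) : Decidable (D_expand_search_range nums target starting_idx) := by unfold D_expand_search_range; infer_instance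

def Spec_expand_search_range (nums : List Int) (target : Int) (starting_idx : Int) (out : List Int) : Prop := ¬ D_expand_search_range nums target starting_idx → out = expand_search_range_alt nums target starting_idx
instance (nums : List Int) (target : Int) (starting_idx : Int) (out : List Int) : Decidable (Spec_expand_search_range nums target starting_idx out) := by unfold Spec_expand_search_range; infer_instance

def pvDiffWitness_expand_search_range : List Int × Int × Int := ([7], 7, -2)
def pvDiffWitnessOut_expand_search_range : (List Int) × (List Int) := ([-2, 0], [-2, -2])

-- ===== CLAIM (what is proved, stated in full; the proofs are below) =====
def Claim_unchanged_expand_search_range : Prop := ∀ (nums : List Int) (target : Int) (starting_idx : Int), Dom_expand_search_range nums target starting_idx → Pre_expand_search_range nums target starting_idx → Spec_expand_search_range nums target starting_idx (expand_search_range nums target starting_idx)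
def Claim_changed_expand_search_range : Prop := Dom_expand_search_range (pvDiffWitness_expand_search_range.1) (pvDiffWitness_expand_search_range.2.1) (pvDiffWitness_expand_search_range.2.2) ∧ Pre_expand_search_range (pvDiffWitness_expand_search_range.1) (pvDiffWitness_expand_search_range.2.1) (pvDiffWitness_expand_search_range.2.2) ∧ D_expand_search_range (pvDiffWitness_expand_search_range.1) (pvDiffWitness_expand_search_range.2.1) (pvDiffWitness_expand_search_range.2.2) ∧ expand_search_range (pvDiffWitness_expand_search_range.1) (pvDiffWitness_expand_search_range.2.1) (pvDiffWitness_expand_search_range.2.2) = pvDiffWitnessOut_expand_search_range.1 ∧ expand_search_range_alt (pvDiffWitness_expand_search_range.1) (pvDiffWitness_expand_search_range.2.1) (pvDiffWitness_expand_search_range.2.2) = pvDiffWitnessOut_expand_search_range.2 ∧ pvDiffWitnessOut_expand_search_range.1 ≠ pvDiffWitnessOut_expand_search_range.2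
def Claim_exact_expand_search_range : Prop := ∀ (nums : List Int) (target : Int) (starting_idx : Int), Dom_expand_search_range nums target starting_idx → Pre_expand_search_range nums target starting_idx → D_expand_search_range nums target starting_idx → expand_search_range nums target starting_idx ≠ expand_search_range_alt nums target starting_idx

-- ===== LEMMAS AND PROOFS =====

-- pvRun t xs = number of leading elements of xs equal to t (the abstract run length both sides meet at).
def pvRun (t : Int) : List Int → Nat
  | [] => 0
  | x :: xs => if x ≠ t then 0 else pvRun t xs + 1

lemma pvRun_le (t : Int) (xs : List Int) : pvRun t xs ≤ xs.length := by
  induction xs with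
  | nil => simp [pvRun]
  | cons x xs ih =>
    simp only [pvRun, List.length_cons]
    split
    · omega
    · omega

lemma pvRun_get (t : Int) (xs : List Int) (k : Nat) (hk : k < pvRun t xs) : xs[k]? = some t := by
  induction xs generalizing k with
  | nil => simp [pvRun] at hk
  | cons x xs ih =>
    simp only [pvRun] at hk
    split at hk
    · omega
    · rename_i hx
      simp only [not_not] at hx
      cases k with
      | zero => simp [hx]
      | succ k => simpa using ih k (by omega)

lemma pvRun_stop (t : Int) (xs : List Int) (h : pvRun t xs < xs.length) :
    xs[pvRun t xs]? ≠ some t := by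
  induction xs with
  | nil => simp [pvRun] at h
  | cons x xs ih =>
    simp only [pvRun, List.length_cons] at *
    by_cases hx : x = t
    · simp only [hx, ne_eq, not_true_eq_false, if_false] at h ⊢
      simpa using ih (by omega)
    · simp [hx]

lemma pvRun_append (t : Int) (A B : List Int) :
    pvRun t (A ++ B) = if pvRun t A = A.length then A.length + pvRun t B else pvRun t A := by
  induction A with
  | nil => simp [pvRun]
  | cons x xs ih =>
    simp only [List.cons_append, pvRun, List.length_cons]
    by_cases hx : x = t
    · simp only [hx, ne_eq, not_true_eq_false, if_false, ih]
      split
      · rename_i h; rw [if_pos (by omega)]; omega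
      · rename_i h; rw [if_neg (by omega)]
    · simp [hx]

lemma pvRun_replicate (t : Int) (r : Nat) : pvRun t (List.replicate r t) = r := by
  induction r with
  | zero => simp [pvRun]
  | succ r ih => simp [List.replicate_succ, pvRun, ih]

lemma pvBuildL_length (t : Int) (xs : List Int) (run : Nat) :
    (pvBuildL t xs run).length = xs.length := by
  induction xs generalizing run with
  | nil => simp [pvBuildL]
  | cons x xs ih => simp [pvBuildL, ih]

-- The table entry at index i is the run length of t ending at i, seeded by `run` matches before xs.
lemma pvBuildL_get (t : Int) (xs : List Int) (run : Nat) (i : Nat) (hi : i < xs.length) :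
    (pvBuildL t xs run)[i]? = some (pvRun t ((xs.take (i+1)).reverse ++ List.replicate run t)) := by
  induction xs generalizing run i with
  | nil => simp at hi
  | cons x xs ih =>
    cases i with
    | zero =>
      simp only [pvBuildL, List.getElem?_cons_zero, Option.some.injEq, List.take_succ_cons,
        List.take_zero, List.reverse_cons, List.reverse_nil, List.nil_append, List.cons_append]
      simp only [pvRun, pvRun_replicate]
      by_cases hx : x = t <;> simp [hx]
    | succ i =>
      simp only [pvBuildL, List.getElem?_cons_succ, List.take_succ_cons, List.reverse_cons]
      rw [ih _ i (by simpa using hi)]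
      congr 1
      rw [List.append_assoc, pvRun_append, pvRun_append]
      split
      · congr 1
        simp only [List.cons_append, pvRun, pvRun_replicate]
        by_cases hx : x = t <;> simp [hx, pvRun_replicate]
      · rfl

-- Left lookup: L[s-1] = run of target ending just before s = pvRun over the reversed prefix.
lemma pvTableL_eq (t : Int) (nums : List Int) (s : Int) (h1 : 1 ≤ s) (h2 : s ≤ (nums.length : Int)) :
    ((PySem.List.pyGet? (pvBuildL t nums 0) (s - 1)).getD 0 : Nat)
      = pvRun t ((nums.take s.toNat).reverse) := by
  rw [PySem.List.pyGet?_of_nonneg _ (by omega)]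
  have hlt : (s - 1).toNat < nums.length := by omega
  rw [pvBuildL_get t nums 0 (s - 1).toNat hlt]
  simp only [List.replicate_zero, List.append_nil, Option.getD_some]
  have hts : (s - 1).toNat + 1 = s.toNat := by omega
  rw [hts]

-- Right lookup: R[j] = run of target starting at j = pvRun over the suffix.
lemma pvTableR_eq (t : Int) (nums : List Int) (j : Int) (h1 : 0 ≤ j) (h2 : j < (nums.length : Int)) :
    ((PySem.List.pyGet? ((pvBuildL t nums.reverse 0).reverse) j).getD 0 : Nat)
      = pvRun t (nums.drop j.toNat) := by
  rw [PySem.List.pyGet?_of_nonneg _ h1]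
  have hlen : (pvBuildL t nums.reverse 0).length = nums.length := by
    rw [pvBuildL_length]; simp
  have hjlt : j.toNat < (pvBuildL t nums.reverse 0).length := by omega
  rw [List.getElem?_reverse hjlt, hlen]
  have hidx : nums.length - 1 - j.toNat < nums.reverse.length := by
    rw [List.length_reverse]; omega
  rw [pvBuildL_get t nums.reverse 0 _ hidx]
  simp only [List.replicate_zero, List.append_nil, Option.getD_some]
  congr 2
  have : nums.length - 1 - j.toNat + 1 = nums.length - j.toNat := by omega
  rw [this, ← List.reverse_drop, List.reverse_reverse]

-- With a negative left index A's loop never moves left, and right never decreases.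
lemma pvLoopA_frozen (nums : List Int) (target : Int) (fuel : Nat) :
    ∀ (left right : Int) (sl sr : Bool), left ≤ -1 →
      ∃ x, pvLoopA nums target fuel left right sl sr = [left, x] ∧ right ≤ x := by
  induction fuel with
  | zero => intro left right sl sr _; exact ⟨right, rfl, le_refl _⟩
  | succ fuel ih =>
    intro left right sl sr hleft
    rw [pvLoopA]
    by_cases hcond : (sl || sr) = true
    · rw [if_pos hcond, if_pos (Or.inl (by omega))]
      by_cases hstop : right + 1 > (nums.length : Int) - 1 ∨ PySem.List.pyGet? nums (right + 1) ≠ some target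
      · rw [if_pos hstop]
        exact ih left right false false hleft
      · rw [if_neg hstop]
        obtain ⟨x, hx, hle⟩ := ih left (right + 1) false sr hleft
        exact ⟨x, hx, by omega⟩
    · rw [if_neg hcond]
      exact ⟨right, rfl, le_refl _⟩

-- Generic run of A's loop: given exact characterisations of the two stop conditions
-- (left stops exactly at distance a, right exactly at distance b), the loop returns [s-a, s+b].
lemma pvLoopA_eq_gen (nums : List Int) (target s : Int) (a b : Nat)
    (hstopL : ∀ l : Nat, l ≤ a →
      ((s - (l : Int) - 1 < 0 ∨ PySem.List.pyGet? nums (s - (l : Int) - 1) ≠ some target) ↔ l = a))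
    (hstopR : ∀ r : Nat, r ≤ b →
      ((s + (r : Int) + 1 > (nums.length : Int) - 1 ∨ PySem.List.pyGet? nums (s + (r : Int) + 1) ≠ some target) ↔ r = b))
    (fuel : Nat) : ∀ (l r : Nat) (sl sr : Bool),
    l ≤ a → r ≤ b → (sl = false → l = a) → (sr = false → r = b) →
    (a - l) + (b - r) ≤ fuel →
    pvLoopA nums target fuel (s - (l : Int)) (s + (r : Int)) sl sr = [s - (a : Int), s + (b : Int)] := by
  induction fuel with
  | zero =>
    intro l r sl sr hla hrb _ _ hfuel
    have h1 : l = a := by omega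
    have h2 : r = b := by omega
    subst h1 h2
    simp [pvLoopA]
  | succ fuel ih =>
    intro l r sl sr hla hrb hsla hsrb hfuel
    rw [pvLoopA]
    by_cases hcond : (sl || sr) = true
    · rw [if_pos hcond]
      by_cases hl : l = a
      · rw [if_pos ((hstopL l hla).mpr hl)]
        by_cases hr : r = b
        · rw [if_pos ((hstopR r hrb).mpr hr)]
          exact ih l r false false hla hrb (fun _ => hl) (fun _ => hr) (by omega)
        · rw [if_neg (fun h => hr ((hstopR r hrb).mp h))]
          have hcast : s + (r : Int) + 1 = s + ((r + 1 : Nat) : Int) := by push_cast; ring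
          simp only [hcast]
          exact ih l (r + 1) false sr hla (by omega) (fun _ => hl)
            (fun h => absurd (hsrb h) hr) (by omega)
      · rw [if_neg (fun h => hl ((hstopL l hla).mp h))]
        have hcastl : s - (l : Int) - 1 = s - ((l + 1 : Nat) : Int) := by push_cast; ring
        by_cases hr : r = b
        · rw [if_pos ((hstopR r hrb).mpr hr)]
          simp only [hcastl]
          exact ih (l + 1) r sl false (by omega) hrb
            (fun h => absurd (hsla h) hl) (fun _ => hr) (by omega)
        · rw [if_neg (fun h => hr ((hstopR r hrb).mp h))]
          have hcastr : s + (r : Int) + 1 = s + ((r + 1 : Nat) : Int) := by push_cast; ring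
          simp only [hcastl, hcastr]
          exact ih (l + 1) (r + 1) sl sr (by omega) (by omega)
            (fun h => absurd (hsla h) hl) (fun h => absurd (hsrb h) hr) (by omega)
    · rw [if_neg hcond]
      have hsl' : sl = false := by cases sl <;> simp_all
      have hsr' : sr = false := by cases sr <;> simp_all
      rw [hsla hsl', hsrb hsr']

-- Stop characterisations for a non-negative start position (0 ≤ s ≤ len).
lemma pvStopL_iff (nums : List Int) (target s : Int) (hs0 : 0 ≤ s) (hsl : s ≤ (nums.length : Int))
    (l : Nat) (hl : l ≤ pvRun target ((nums.take s.toNat).reverse)) :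
    (s - (l : Int) - 1 < 0 ∨ PySem.List.pyGet? nums (s - (l : Int) - 1) ≠ some target) ↔
      l = pvRun target ((nums.take s.toNat).reverse) := by
  set a := pvRun target ((nums.take s.toNat).reverse) with ha
  have hTlen : (nums.take s.toNat).length = s.toNat := by simp; omega
  have hPlen : ((nums.take s.toNat).reverse).length = s.toNat := by simp; omega
  have haN : a ≤ s.toNat := hPlen ▸ pvRun_le _ _
  have hsN : (s.toNat : Int) = s := Int.toNat_of_nonneg hs0
  rcases lt_or_eq_of_le hl with hlt | heq
  · have hget : PySem.List.pyGet? nums (s - (l : Int) - 1) = some target := by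
      have h1 := pvRun_get target _ l hlt
      rw [List.getElem?_reverse (by omega), List.getElem?_take_of_lt (by omega)] at h1
      rw [PySem.List.pyGet?_of_nonneg nums (by omega)]
      have : (s - (l : Int) - 1).toNat = s.toNat - 1 - l := by omega
      rw [this, ← hTlen]; exact h1
    refine iff_of_false ?_ (by omega)
    rintro (h | h)
    · omega
    · exact h hget
  · refine iff_of_true ?_ heq
    by_cases hcase : a = s.toNat
    · left; omega
    · right
      have hstop := pvRun_stop target ((nums.take s.toNat).reverse) (by omega)
      rw [List.getElem?_reverse (by omega), List.getElem?_take_of_lt (by omega)] at hstop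
      rw [PySem.List.pyGet?_of_nonneg nums (by omega)]
      have h2 : (s - (l : Int) - 1).toNat = (nums.take s.toNat).length - 1 - a := by omega
      rw [h2]; exact hstop

lemma pvStopR_iff (nums : List Int) (target s : Int) (hs0 : 0 ≤ s) (hsl : s ≤ (nums.length : Int))
    (r : Nat) (hr : r ≤ pvRun target (nums.drop (s.toNat + 1))) :
    (s + (r : Int) + 1 > (nums.length : Int) - 1 ∨ PySem.List.pyGet? nums (s + (r : Int) + 1) ≠ some target) ↔
      r = pvRun target (nums.drop (s.toNat + 1)) := by
  set b := pvRun target (nums.drop (s.toNat + 1)) with hb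
  have hSlen : (nums.drop (s.toNat + 1)).length = nums.length - (s.toNat + 1) := by simp
  have hbN : b ≤ nums.length - (s.toNat + 1) := hSlen ▸ pvRun_le _ _
  have hsN : (s.toNat : Int) = s := Int.toNat_of_nonneg hs0
  rcases lt_or_eq_of_le hr with hlt | heq
  · have hget : PySem.List.pyGet? nums (s + (r : Int) + 1) = some target := by
      have h1 := pvRun_get target _ r hlt
      rw [List.getElem?_drop] at h1
      rw [PySem.List.pyGet?_of_nonneg nums (by omega)]
      have : (s + (r : Int) + 1).toNat = s.toNat + 1 + r := by omega
      rw [this]; exact h1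
    refine iff_of_false ?_ (by omega)
    rintro (h | h)
    · omega
    · exact h hget
  · refine iff_of_true ?_ heq
    by_cases hcase : b = nums.length - (s.toNat + 1)
    · left; omega
    · right
      have hstop := pvRun_stop target (nums.drop (s.toNat + 1)) (by omega)
      rw [List.getElem?_drop] at hstop
      rw [PySem.List.pyGet?_of_nonneg nums (by omega)]
      have h2 : (s + (r : Int) + 1).toNat = s.toNat + 1 + b := by omega
      rw [h2]; exact hstop

-- Stop characterisations for a negative start: the left scan stops immediately.
lemma pvStopL_neg (nums : List Int) (target s : Int) (hs : s ≤ -1) :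
    ∀ l : Nat, l ≤ 0 →
      ((s - (l : Int) - 1 < 0 ∨ PySem.List.pyGet? nums (s - (l : Int) - 1) ≠ some target) ↔ l = 0) := by
  intro l hl
  exact iff_of_true (Or.inl (by omega)) (by omega)

-- Right stop characterisation for s = -1: the probe index is r itself.
lemma pvStopR_minus1 (nums : List Int) (target : Int) :
    ∀ r : Nat, r ≤ pvRun target nums →
      ((-1 + (r : Int) + 1 > (nums.length : Int) - 1 ∨
        PySem.List.pyGet? nums (-1 + (r : Int) + 1) ≠ some target) ↔ r = pvRun target nums) := by
  intro r hr
  have hidx : (-1 + (r : Int) + 1) = (r : Int) := by ring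
  rw [hidx, PySem.List.pyGet?_natCast]
  have hbN : pvRun target nums ≤ nums.length := pvRun_le _ _
  rcases lt_or_eq_of_le hr with hlt | heq
  · have hget := pvRun_get target nums r hlt
    refine iff_of_false ?_ (by omega)
    rintro (h | h)
    · omega
    · exact h hget
  · refine iff_of_true ?_ heq
    by_cases hcase : pvRun target nums = nums.length
    · left; omega
    · right
      rw [heq]
      exact pvRun_stop target nums (by omega)

-- ===== VERDICT (by name: the statement is the Claim_ definition above) =====
theorem expand_search_range_spec : Claim_unchanged_expand_search_range := by
  intro nums target s _ hpre hnd
  obtain ⟨hpre1, hpre2⟩ := hpre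
  unfold expand_search_range expand_search_range_alt
  dsimp only
  by_cases hs0 : 0 ≤ s
  · -- non-negative start: both guards read the run-length tables
    have hlval : (if 1 ≤ s then (((PySem.List.pyGet? (pvBuildL target nums 0) (s - 1)).getD 0 : Nat) : Int) else 0)
        = ((pvRun target ((nums.take s.toNat).reverse) : Nat) : Int) := by
      by_cases h1 : 1 ≤ s
      · rw [if_pos h1, pvTableL_eq target nums s h1 hpre2]
      · rw [if_neg h1]
        have : s.toNat = 0 := by omega
        simp [this, pvRun]
    have hrval : (if 0 ≤ s + 1 ∧ s + 1 < (nums.length : Int) then (((PySem.List.pyGet? ((pvBuildL target nums.reverse 0).reverse) (s + 1)).getD 0 : Nat) : Int) else 0)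
        = ((pvRun target (nums.drop (s.toNat + 1)) : Nat) : Int) := by
      by_cases h1 : s + 1 < (nums.length : Int)
      · rw [if_pos ⟨by omega, h1⟩, pvTableR_eq target nums (s + 1) (by omega) h1]
        have hts : (s + 1).toNat = s.toNat + 1 := by omega
        rw [hts]
      · rw [if_neg (by tauto)]
        have : nums.drop (s.toNat + 1) = [] := List.drop_eq_nil_of_le (by omega)
        simp [this, pvRun]
    simp only [hlval, hrval]
    have hPlen : ((nums.take s.toNat).reverse).length = s.toNat := by simp; omega
    have hSlen : (nums.drop (s.toNat + 1)).length = nums.length - (s.toNat + 1) := by simp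
    have haN := hPlen ▸ pvRun_le target ((nums.take s.toNat).reverse)
    have hbN := hSlen ▸ pvRun_le target (nums.drop (s.toNat + 1))
    have := pvLoopA_eq_gen nums target s
      (pvRun target ((nums.take s.toNat).reverse)) (pvRun target (nums.drop (s.toNat + 1)))
      (pvStopL_iff nums target s hs0 hpre2) (pvStopR_iff nums target s hs0 hpre2)
      (nums.length + 1) 0 0 true true (by omega) (by omega) (by simp) (by simp) (by omega)
    simpa using this
  · -- negative start: the left guard is false on both sides
    have hs1 : s ≤ -1 := by omega
    rw [if_neg (by omega)]
    by_cases hsm1 : s = -1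
    · -- s = -1: B reads R[0] (when nonempty), A scans the whole list from index 0
      subst hsm1
      have hrval : (if 0 ≤ (-1 : Int) + 1 ∧ (-1 : Int) + 1 < (nums.length : Int) then (((PySem.List.pyGet? ((pvBuildL target nums.reverse 0).reverse) ((-1 : Int) + 1)).getD 0 : Nat) : Int) else 0)
          = ((pvRun target nums : Nat) : Int) := by
        by_cases h1 : (-1 : Int) + 1 < (nums.length : Int)
        · rw [if_pos ⟨by omega, h1⟩]
          have := pvTableR_eq target nums 0 le_rfl (by omega)
          norm_num at this ⊢
          rw [this]
        · rw [if_neg (by tauto)]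
          have hnil : nums = [] := List.length_eq_zero_iff.mp (by omega)
          simp [hnil, pvRun]
      simp only [hrval]
      have hbN := pvRun_le target nums
      have := pvLoopA_eq_gen nums target (-1) 0 (pvRun target nums)
        (pvStopL_neg nums target (-1) (by omega))
        (pvStopR_minus1 nums target)
        (nums.length + 1) 0 0 true true (by omega) (by omega) (by simp) (by simp) (by omega)
      simpa using this
    · -- s ≤ -2 outside D_: nums[s+1] ≠ target, both scans stop immediately
      have hs2 : s ≤ -2 := by omega
      rw [if_neg (by omega)]
      have hne : PySem.List.pyGet? nums (s + 1) ≠ some target := fun h => hnd ⟨hs2, h⟩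
      have hstopR : ∀ r : Nat, r ≤ 0 →
          ((s + (r : Int) + 1 > (nums.length : Int) - 1 ∨
            PySem.List.pyGet? nums (s + (r : Int) + 1) ≠ some target) ↔ r = 0) := by
        intro r hr
        have hr0 : r = 0 := by omega
        subst hr0
        exact iff_of_true (Or.inr (by simpa using hne)) rfl
      have := pvLoopA_eq_gen nums target s 0 0
        (pvStopL_neg nums target s hs1) hstopR
        (nums.length + 1) 0 0 true true (by omega) (by omega) (by simp) (by simp) (by omega)
      simpa using this

theorem expand_search_range_changed : Claim_changed_expand_search_range := by
  unfold Claim_changed_expand_search_range; decide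

theorem expand_search_range_tight : Claim_exact_expand_search_range := by
  intro nums target s _ hpre hd
  obtain ⟨hpre1, hpre2⟩ := hpre
  obtain ⟨hs2, hget⟩ := hd
  -- the list is nonempty: the wrapped probe index s+1 is in range
  have hin : PySem.Raise.InRange nums.length (s + 1) := by
    by_contra h
    rw [(PySem.List.pyGet?_eq_none_iff nums (s + 1)).mpr h] at hget
    simp at hget
  have hin' : -(nums.length : Int) ≤ s + 1 ∧ s + 1 < nums.length := by
    simpa [PySem.Raise.InRange] using hin
  unfold expand_search_range expand_search_range_alt
  dsimp only
  -- B freezes both boundaries at s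
  rw [if_neg (by omega), if_neg (by omega)]
  -- A's first iteration moves right to s+1, then right never decreases
  rw [pvLoopA, if_pos (by simp), if_pos (Or.inl (by omega)),
      if_neg (by rw [not_or]; exact ⟨by omega, fun h => h hget⟩)]
  obtain ⟨x, hx, hxge⟩ := pvLoopA_frozen nums target nums.length s (s + 1) false true (by omega)
  simp only [hx]
  intro heq
  simp only [List.cons.injEq] at heq
  omega
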